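-- pv_equiv track=rewrite | github.com/Enarb1/SoftUni_Python | Fundamentals/06.List Exercise/More Exercises/06.list_manipulator_var2.py | last_count_odd
-- ===== SOURCE A (Python) =====
-- def last_count_odd(first_list,num_count):
--     last_odd = []
--     for num in first_list:
--         if int(num) % 2 != 0:
--             last_odd.append(num)
--             if len(last_odd) > num_count:
--                 last_odd.pop(0)
--     return list(map(int, last_odd))
-- ===== SOURCE B (Python) =====
-- def last_count_odd(first_list, num_count):
--     odds = [int(n) for n in first_list if int(n) % 2 != 0]
--     if num_count <= 0:
--         return []
--     return odds[-num_count:]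
-- ===== Notes on version B (the rewrite author's own statement) =====
-- stated objective: simpler
-- what changed: Replaces the incremental sliding-window maintenance (append + length check + pop(0) per element) with one comprehension collecting all odd numbers followed by a single negative-index slice taking the last num_count of them.
import Mathlib
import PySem

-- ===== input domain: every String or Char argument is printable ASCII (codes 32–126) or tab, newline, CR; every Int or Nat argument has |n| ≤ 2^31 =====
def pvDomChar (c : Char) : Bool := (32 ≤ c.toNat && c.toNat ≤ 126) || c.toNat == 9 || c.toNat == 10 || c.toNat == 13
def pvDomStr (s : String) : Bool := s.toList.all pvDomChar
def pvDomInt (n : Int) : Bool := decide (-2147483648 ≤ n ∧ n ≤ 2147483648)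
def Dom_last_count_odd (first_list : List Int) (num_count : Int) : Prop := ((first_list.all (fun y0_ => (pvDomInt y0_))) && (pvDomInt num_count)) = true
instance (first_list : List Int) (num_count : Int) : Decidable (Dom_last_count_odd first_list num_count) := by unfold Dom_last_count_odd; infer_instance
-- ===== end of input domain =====

-- B replaces A's per-element sliding-window maintenance (append, length check, pop(0))
-- with one filter of all odd numbers followed by a single negative slice; objective: simpler.


-- ===== PORT A =====
-- the loop body: append, then pop(0) (here: drop 1 of the just-appended, nonempty list) if too long
def lastCountOddStep (num_count : Int) (last_odd : List Int) (num : Int) : List Int :=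
  if PySem.Int.mod num 2 ≠ 0 then
    let appended := last_odd ++ [num]
    if (appended.length : Int) > num_count then appended.drop 1 else appended
  else last_odd

def last_count_odd (first_list : List Int) (num_count : Int) : List Int :=
  (first_list.foldl (lastCountOddStep num_count) []).map (fun n => n)  -- list(map(int, last_odd)); int is identity on Int

-- ===== PORT B =====
def last_count_odd_alt (first_list : List Int) (num_count : Int) : List Int :=
  let odds := first_list.filter (fun n => decide (PySem.Int.mod n 2 ≠ 0))
  if num_count ≤ 0 then [] else PySem.List.slice odds (some (-num_count)) none

-- ===== PRECONDITION & SPEC =====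
def Spec_last_count_odd (first_list : List Int) (num_count : Int) (out : List Int) : Prop := out = last_count_odd_alt first_list num_count
instance (first_list : List Int) (num_count : Int) (out : List Int) : Decidable (Spec_last_count_odd first_list num_count out) := by unfold Spec_last_count_odd; infer_instance

-- ===== CLAIM (what is proved, stated in full; the proofs are below) =====
def Claim_equal_last_count_odd : Prop := ∀ (first_list : List Int) (num_count : Int), Dom_last_count_odd first_list num_count → Spec_last_count_odd first_list num_count (last_count_odd first_list num_count)

-- ===== LEMMAS AND PROOFS =====

-- the "last k elements" of a list
def lastK (k : Nat) (xs : List Int) : List Int := xs.drop (xs.length - k)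

theorem lastK_of_len_le (k : Nat) (xs : List Int) (h : xs.length ≤ k) : lastK k xs = xs := by
  unfold lastK; rw [Nat.sub_eq_zero_of_le h, List.drop_zero]

theorem lastK_drop_one (k : Nat) (ys : List Int) (h : k + 1 ≤ ys.length) :
    lastK k (ys.drop 1) = lastK k ys := by
  simp only [lastK, List.length_drop, List.drop_drop]
  congr 1
  omega

-- the fold invariant: from a state of length ≤ k (k = num_count > 0), the fold computes
-- the last k elements of (state ++ odds of the remaining list)
theorem fold_invariant (c : Int) (k : Nat) (hck : c = (k : Int)) :
    ∀ (l s : List Int), s.length ≤ k →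
      l.foldl (lastCountOddStep c) s
        = lastK k (s ++ l.filter (fun n => decide (PySem.Int.mod n 2 ≠ 0))) := by
  intro l
  induction l with
  | nil => intro s hs; simp [lastK_of_len_le k s hs]
  | cons h t ih =>
    intro s hs
    rw [List.foldl_cons]
    by_cases hodd : h % 2 = 1
    · by_cases hlen : c ≤ (s.length : Int)
      · have hlen' : s.length = k := by omega
        rw [show lastCountOddStep c s h = (s ++ [h]).tail from by
          simp [lastCountOddStep, hodd, hlen]]
        rw [ih ((s ++ [h]).tail) (by simp; omega)]
        have hd : (s ++ [h]).tail ++ t.filter (fun n => decide (PySem.Int.mod n 2 ≠ 0))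
            = ((s ++ [h]) ++ t.filter (fun n => decide (PySem.Int.mod n 2 ≠ 0))).tail := by
          have h1 : (1:Nat) ≤ (s ++ [h]).length := by simp
          rw [← List.drop_one, ← List.drop_one, List.drop_append_of_le_length h1]
        rw [hd, ← List.drop_one, lastK_drop_one k _ (by simp; omega)]
        simp [hodd]
      · rw [show lastCountOddStep c s h = s ++ [h] from by
          simp [lastCountOddStep, hodd, hlen]]
        rw [ih (s ++ [h]) (by simp; omega)]
        simp [hodd]
    · rw [show lastCountOddStep c s h = s from by simp [lastCountOddStep, hodd]]
      rw [ih s hs]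
      simp [hodd]

-- with num_count ≤ 0 the window is emptied immediately after every append: the state stays []
theorem fold_nonpos (c : Int) (hc : c ≤ 0) :
    ∀ (l : List Int), l.foldl (lastCountOddStep c) [] = [] := by
  intro l
  induction l with
  | nil => rfl
  | cons h t ih =>
    have hstep : lastCountOddStep c [] h = [] := by
      simp only [lastCountOddStep]
      split_ifs with h1 h2
      · rfl
      · simp only [List.nil_append, List.length_cons, List.length_nil] at h2; omega
      · rfl
    rw [List.foldl_cons, hstep, ih]

-- ===== VERDICT (by name: the statement is the Claim_ definition above) =====
theorem last_count_odd_spec : Claim_equal_last_count_odd := by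
  intro first_list num_count _
  unfold Spec_last_count_odd last_count_odd last_count_odd_alt
  by_cases hc : num_count ≤ 0
  · simp [fold_nonpos num_count hc, hc]
  · have hpos : 0 < num_count := by omega
    set k := num_count.toNat with hkdef
    have hk : 0 < k := by omega
    have hck : num_count = (k : Int) := by omega
    rw [List.map_id_fun', fold_invariant num_count k hck first_list [] (by simp)]
    rw [if_neg hc]
    have : -num_count = -((k : Nat) : Int) := by omega
    rw [this, PySem.List.slice_from_neg_natCast _ _ hk]
    simp [lastK]
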